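-- pv_equiv track=rewrite | github.com/izabeleb/COVID_URL_ANALYSIS | Final_Deliverable/DataProcessor.py | ATTRIB_number_of_sentences
-- ===== SOURCE A (Python) =====
-- def ATTRIB_number_of_sentences(text):
--     try:
--         tokens = text.split()
--         new_text = [token for token in tokens if not token.startswith("http")]
--         new_text = " ".join(new_text) #removing urls to not impact this
--         new_text = new_text.replace("?",".").replace("!",".").split(".")
--         new_text = [item for item in new_text if not item == ""]
--         return len(new_text)
--     except:
--         return 0
-- ===== SOURCE B (Python) =====
-- def ATTRIB_number_of_sentences(text):
--     try:
--         cleaned = " ".join(t for t in text.split() if not t.startswith("http"))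
--         count = 0
--         has_content = False
--         for ch in cleaned:
--             if ch in ".?!":
--                 if has_content:
--                     count += 1
--                 has_content = False
--             else:
--                 has_content = True
--         return count + (1 if has_content else 0)
--     except:
--         return 0
-- ===== Notes on version B (the rewrite author's own statement) =====
-- stated objective: alternative
-- what changed: B keeps the URL-dropping join but replaces A's replace/split/filter-empty pipeline by a single character scan over the cleaned string with a has-content flag that counts terminator-delimited non-empty segments.
import Mathlib
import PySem

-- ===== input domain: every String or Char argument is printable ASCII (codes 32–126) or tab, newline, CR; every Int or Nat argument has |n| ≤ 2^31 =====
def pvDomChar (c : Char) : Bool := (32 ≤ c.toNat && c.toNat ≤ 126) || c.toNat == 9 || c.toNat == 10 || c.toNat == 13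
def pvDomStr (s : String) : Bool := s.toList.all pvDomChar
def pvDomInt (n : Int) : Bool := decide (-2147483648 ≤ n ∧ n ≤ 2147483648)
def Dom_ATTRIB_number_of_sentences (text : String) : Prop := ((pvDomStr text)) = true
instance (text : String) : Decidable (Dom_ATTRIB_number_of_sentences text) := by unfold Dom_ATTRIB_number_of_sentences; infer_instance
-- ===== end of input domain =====

-- B replaces A's replace/split/filter pipeline over the cleaned string by a single
-- character scan with a has-content flag (alternative decomposition, same cost).

-- ===== PORT A =====
def ATTRIB_number_of_sentences (text : String) : Int :=
  let tokens := PySem.Str.split₀ text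
  let newText1 := tokens.filter (fun token => !(PySem.Str.startswith token "http"))
  let newText2 := PySem.Str.join " " newText1
  -- .split(".") with a nonempty separator always succeeds: getD is never the default
  let newText3 := (PySem.Str.split? (PySem.Str.replace (PySem.Str.replace newText2 "?" ".") "!" ".") ".").getD []
  let newText4 := newText3.filter (fun item => !(item == ""))
  (newText4.length : Int)

-- ===== PORT B =====
-- the loop body of Source B: state = (count, has_content)
def pvScanStep (st : Nat × Bool) (ch : Char) : Nat × Bool :=
  if ch = '.' ∨ ch = '?' ∨ ch = '!' then
    (if st.2 then st.1 + 1 else st.1, false)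
  else (st.1, true)

def ATTRIB_number_of_sentences_alt (text : String) : Int :=
  let cleaned := PySem.Str.join " " ((PySem.Str.split₀ text).filter (fun t => !(PySem.Str.startswith t "http")))
  let st := cleaned.toList.foldl pvScanStep (0, false)
  ((st.1 + if st.2 then 1 else 0 : Nat) : Int)

-- ===== PRECONDITION & SPEC =====
def Spec_ATTRIB_number_of_sentences (text : String) (out : Int) : Prop := out = ATTRIB_number_of_sentences_alt text
instance (text : String) (out : Int) : Decidable (Spec_ATTRIB_number_of_sentences text out) := by unfold Spec_ATTRIB_number_of_sentences; infer_instance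

-- ===== CLAIM (what is proved, stated in full; the proofs are below) =====
def Claim_equal_ATTRIB_number_of_sentences : Prop := ∀ (text : String), Dom_ATTRIB_number_of_sentences text → Spec_ATTRIB_number_of_sentences text (ATTRIB_number_of_sentences text)

-- ===== LEMMAS AND PROOFS =====

-- proof-only helpers: a simple structural model of splitting on '.'
def pvMySplit : List Char → List Char → List (List Char)
  | [], cur => [cur.reverse]
  | c :: t, cur => if c = '.' then cur.reverse :: pvMySplit t [] else pvMySplit t (c :: cur)

-- the character map performed by .replace("?",".").replace("!",".")
def pvMapDot (x : Char) : Char :=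
  if x = '.' ∨ x = '?' ∨ x = '!' then '.' else x

theorem pv_replace_go_single (c d : Char) (cs : List Char) (fuel : Nat) (acc : List Char)
    (h : cs.length ≤ fuel) :
    PySem.Chars.replace.go [c] [d] fuel cs acc
      = acc.reverse ++ cs.map (fun x => if x = c then d else x) := by
  induction cs generalizing fuel acc with
  | nil =>
    cases fuel <;> simp [PySem.Chars.replace.go]
  | cons x t ih =>
    cases fuel with
    | zero => simp at h
    | succ n =>
      rw [PySem.Chars.replace.go]
      by_cases hx : x = c
      · subst hx
        simp [List.isPrefixOf, ih n (d :: acc) (by simpa using h)]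
      · simp [List.isPrefixOf, Ne.symm hx, hx, ih n (x :: acc) (by simpa using h)]

theorem pv_replace_single (c d : Char) (cs : List Char) :
    PySem.Chars.replace cs [c] [d] = cs.map (fun x => if x = c then d else x) := by
  rw [PySem.Chars.replace]
  simp [pv_replace_go_single c d cs cs.length [] le_rfl]

theorem pv_splitOn_go_dot (cs : List Char) (fuel : Nat) (cur : List Char) (acc : List (List Char))
    (h : cs.length ≤ fuel) :
    PySem.Chars.splitOn.go ['.'] fuel cs cur acc
      = acc.reverse ++ pvMySplit cs cur := by
  induction cs generalizing fuel cur acc with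
  | nil =>
    cases fuel <;> simp [PySem.Chars.splitOn.go, pvMySplit]
  | cons x t ih =>
    cases fuel with
    | zero => simp at h
    | succ n =>
      rw [PySem.Chars.splitOn.go]
      by_cases hx : x = '.'
      · subst hx
        simp [List.isPrefixOf, ih n [] _ (by simpa using h), pvMySplit]
      · simp [List.isPrefixOf, Ne.symm hx, hx, ih n (x :: cur) acc (by simpa using h), pvMySplit]

theorem pv_splitOn_dot (cs : List Char) :
    PySem.Chars.splitOn cs ['.'] = pvMySplit cs [] := by
  rw [PySem.Chars.splitOn]
  simp [pv_splitOn_go_dot cs (cs.length + 1) [] [] (by omega)]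

theorem pv_count_lemma (cs cur : List Char) (k : Nat) :
    (let st := cs.foldl pvScanStep (k, !cur.isEmpty); st.1 + if st.2 then 1 else 0)
      = k + ((pvMySplit (cs.map pvMapDot) cur).filter (fun l => !(l == []))).length := by
  induction cs generalizing cur k with
  | nil =>
    cases cur <;> simp [pvMySplit]
  | cons c t ih =>
    by_cases hc : c = '.' ∨ c = '?' ∨ c = '!'
    · have hg : pvMapDot c = '.' := by simp [pvMapDot, hc]
      have hstep : pvScanStep (k, !cur.isEmpty) c
          = ((if !cur.isEmpty then k + 1 else k), false) := by
        simp [pvScanStep, hc]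
      have hfb : (false : Bool) = !([] : List Char).isEmpty := by simp
      calc (let st := (c :: t).foldl pvScanStep (k, !cur.isEmpty); st.1 + if st.2 then 1 else 0)
          = (let st := t.foldl pvScanStep ((if !cur.isEmpty then k + 1 else k), !([] : List Char).isEmpty);
              st.1 + if st.2 then 1 else 0) := by
            simp only [List.foldl_cons, hstep, hfb]
        _ = (if !cur.isEmpty then k + 1 else k)
              + ((pvMySplit (t.map pvMapDot) []).filter (fun l => !(l == []))).length := ih [] _
        _ = k + ((pvMySplit ((c :: t).map pvMapDot) cur).filter (fun l => !(l == []))).length := by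
            cases cur <;> simp [hg, pvMySplit] <;> try omega
    · have hg : pvMapDot c = c := by simp [pvMapDot, hc]
      have hstep : pvScanStep (k, !cur.isEmpty) c = (k, true) := by
        simp [pvScanStep, hc]
      have hfb : (true : Bool) = !(c :: cur).isEmpty := by simp
      have hcdot : ¬ c = '.' := fun h => hc (Or.inl h)
      calc (let st := (c :: t).foldl pvScanStep (k, !cur.isEmpty); st.1 + if st.2 then 1 else 0)
          = (let st := t.foldl pvScanStep (k, !(c :: cur).isEmpty); st.1 + if st.2 then 1 else 0) := by
            simp only [List.foldl_cons, hstep, hfb]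
        _ = k + ((pvMySplit (t.map pvMapDot) (c :: cur)).filter (fun l => !(l == []))).length := ih (c :: cur) _
        _ = k + ((pvMySplit ((c :: t).map pvMapDot) cur).filter (fun l => !(l == []))).length := by
            simp [hg, pvMySplit, hcdot]

theorem pv_map_comp (cs : List Char) :
    cs.map ((fun x => if x = '!' then '.' else x) ∘ (fun x => if x = '?' then '.' else x))
      = cs.map pvMapDot := by
  apply List.map_congr_left
  intro x _
  by_cases h1 : x = '?' <;> by_cases h2 : x = '!' <;> simp_all [pvMapDot, Function.comp]

theorem pv_pipeline (s : String) :
    ((((PySem.Str.split? (PySem.Str.replace (PySem.Str.replace s "?" ".") "!" ".") ".").getD []).filter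
        (fun item => !(item == ""))).length : Int)
      = ((let st := s.toList.foldl pvScanStep (0, false); st.1 + if st.2 then 1 else 0 : Nat) : Int) := by
  have hsplit : PySem.Str.split? (PySem.Str.replace (PySem.Str.replace s "?" ".") "!" ".") "."
      = some ((pvMySplit (s.toList.map pvMapDot) []).map String.ofList) := by
    rw [PySem.Str.split?]
    have ht : (".".toList : List Char) = ['.'] := rfl
    rw [ht, show (PySem.Str.replace (PySem.Str.replace s "?" ".") "!" ".").toList
        = s.toList.map pvMapDot from by
      simp [PySem.Str.toList_replace, pv_replace_single, pv_map_comp]]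
    simp [PySem.Chars.split?, pv_splitOn_dot]
  rw [hsplit]
  simp only [Option.getD_some]
  have hcount := pv_count_lemma s.toList [] 0
  simp only [List.isEmpty_nil, Bool.not_true, Nat.zero_add] at hcount
  rw [hcount]
  congr 1
  rw [List.filter_map, List.length_map]
  congr 1
  apply List.filter_congr
  intro l _
  apply Bool.eq_iff_iff.mpr
  simp [String.ofList_eq_empty_iff]

-- ===== VERDICT (by name: the statement is the Claim_ definition above) =====
theorem ATTRIB_number_of_sentences_spec : Claim_equal_ATTRIB_number_of_sentences := by
  intro text _
  show ATTRIB_number_of_sentences text = ATTRIB_number_of_sentences_alt text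
  unfold ATTRIB_number_of_sentences ATTRIB_number_of_sentences_alt
  exact pv_pipeline _
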